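-- pv_equiv track=rewrite | github.com/ProfessorRex/numbergame | app/src/main/python/numgame.py | is_strictly_decreasing
-- ===== SOURCE A (Python) =====
-- def get_digits(num):
--     digits = []
--     string = str(num)
--     for digit in string:
--         digits.append(int(digit))
--     return digits
--
-- def is_strictly_decreasing(num):
--     ''' Each digit is strictly less than the digit before '''
--     digits = get_digits(num)
--     x = 10
--     for digit in digits:
--         if digit < x:
--             x = digit
--         else:
--             return False
--     return True
-- ===== SOURCE B (Python) =====
-- def is_strictly_decreasing(num):
--     ''' Each digit is strictly less than the digit before '''
--     digits = [int(c) for c in str(num)]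
--     return digits == sorted(digits, reverse=True) and len(set(digits)) == len(digits)
-- ===== Notes on version B (the rewrite author's own statement) =====
-- stated objective: alternative
-- what changed: Replaces the running-sentinel scan (x starts at 10, each digit must beat it) by a declarative characterization: the digit list equals its descending sort and all digits are distinct.
import Mathlib
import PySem

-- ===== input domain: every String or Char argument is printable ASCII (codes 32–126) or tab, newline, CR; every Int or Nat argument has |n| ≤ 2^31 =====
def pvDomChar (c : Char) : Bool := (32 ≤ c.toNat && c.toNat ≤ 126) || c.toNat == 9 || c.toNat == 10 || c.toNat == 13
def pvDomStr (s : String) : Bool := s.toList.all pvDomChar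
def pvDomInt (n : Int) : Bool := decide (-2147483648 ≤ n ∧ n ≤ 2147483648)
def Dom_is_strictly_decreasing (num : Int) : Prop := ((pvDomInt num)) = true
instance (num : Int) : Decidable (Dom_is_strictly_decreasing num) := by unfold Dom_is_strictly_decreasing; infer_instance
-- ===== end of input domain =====

-- B checks "digits equal their descending sort and are all distinct" instead of A's running-sentinel scan; equal on all num ≥ 0 (alternative decomposition, no speed claim).

-- ===== PORT A =====
-- int(c) for a single char c; on a non-digit char (the '-' of a negative number) Python raises
-- ValueError — Pre_ excludes exactly those inputs, so the .getD 0 default is never reached there.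
def pvCharInt (c : Char) : Int := (PySem.Int.ofChars? [c]).getD 0

def get_digits (num : Int) : List Int :=
  (PySem.Int.toChars num).foldl (fun digits c => digits ++ [pvCharInt c]) []

-- the 'for digit in digits' loop with the running sentinel x (initially 10)
def pvDecLoop : List Int → Int → Bool
  | [], _ => true
  | d :: ds, x => if d < x then pvDecLoop ds d else false

def is_strictly_decreasing (num : Int) : Bool :=
  pvDecLoop (get_digits num) 10

-- ===== PORT B =====
def is_strictly_decreasing_alt (num : Int) : Bool :=
  let digits := (PySem.Int.toChars num).map pvCharInt
  decide (digits = PySem.List.sorted digits (fun x => x) true)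
    && decide ((PySem.Set.ofList digits).length = digits.length)

-- ===== PRECONDITION & SPEC =====
-- A (and B) raise ValueError on num < 0: str(num) then contains '-', and int('-') raises.
def Pre_is_strictly_decreasing (num : Int) : Prop := 0 ≤ num
instance (num : Int) : Decidable (Pre_is_strictly_decreasing num) := by unfold Pre_is_strictly_decreasing; infer_instance
def pvWitness_is_strictly_decreasing : Int := (321)

def Spec_is_strictly_decreasing (num : Int) (out : Bool) : Prop := out = is_strictly_decreasing_alt num
instance (num : Int) (out : Bool) : Decidable (Spec_is_strictly_decreasing num out) := by unfold Spec_is_strictly_decreasing; infer_instance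

-- ===== CLAIM (what is proved, stated in full; the proofs are below) =====
def Claim_equal_is_strictly_decreasing : Prop := ∀ (num : Int), Dom_is_strictly_decreasing num → Pre_is_strictly_decreasing num → Spec_is_strictly_decreasing num (is_strictly_decreasing num)

-- ===== LEMMAS AND PROOFS =====

theorem pvFoldlAppend (f : Char → Int) : ∀ (cs : List Char) (acc : List Int),
    cs.foldl (fun ds c => ds ++ [f c]) acc = acc ++ cs.map f := by
  intro cs
  induction cs with
  | nil => simp
  | cons c cs ih => intro acc; simp [List.foldl, ih]

theorem pvDecLoop_iff : ∀ (ds : List Int) (x : Int),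
    pvDecLoop ds x = true ↔ List.Pairwise (fun a b => b < a) (x :: ds) := by
  intro ds
  induction ds with
  | nil => intro x; simp [pvDecLoop]
  | cons d ds ih =>
    intro x
    simp only [pvDecLoop, List.pairwise_cons]
    constructor
    · intro h
      split_ifs at h with hdx
      · have h' := (ih d).mp h
        rw [List.pairwise_cons] at h'
        refine ⟨fun a ha => ?_, h'⟩
        rcases List.mem_cons.mp ha with rfl | ha'
        · exact hdx
        · exact lt_trans (h'.1 a ha') hdx
    · rintro ⟨hx, hd⟩
      have hdx : d < x := hx d (List.mem_cons_self)
      rw [if_pos hdx]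
      exact (ih d).mpr (List.pairwise_cons.mpr hd)

theorem pvMemToDigitsCore : ∀ (fuel n : Nat) (acc : List Char) (c : Char),
    c ∈ Nat.toDigitsCore 10 fuel n acc → c ∈ acc ∨ ∃ m : Nat, m < 10 ∧ c = Nat.digitChar m := by
  intro fuel
  induction fuel with
  | zero => intro n acc c h; exact Or.inl h
  | succ f ih =>
    intro n acc c h
    simp only [Nat.toDigitsCore] at h
    split at h
    · rcases List.mem_cons.mp h with rfl | h'
      · exact Or.inr ⟨n % 10, Nat.mod_lt _ (by omega), rfl⟩
      · exact Or.inl h'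
    · rcases ih _ _ _ h with h' | h'
      · rcases List.mem_cons.mp h' with rfl | h''
        · exact Or.inr ⟨n % 10, Nat.mod_lt _ (by omega), rfl⟩
        · exact Or.inl h''
      · exact Or.inr h'

theorem pvCharInt_digitChar_le (m : Nat) (h : m < 10) : pvCharInt (Nat.digitChar m) ≤ 9 := by
  interval_cases m <;> decide

-- every digit of a nonnegative number's decimal string maps to a value < 10
theorem pvDigits_lt (num : Int) (h : 0 ≤ num) :
    ∀ d ∈ (PySem.Int.toChars num).map pvCharInt, d < 10 := by
  intro d hd
  rcases List.mem_map.mp hd with ⟨c, hc, rfl⟩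
  have : ¬ num < 0 := not_lt.mpr h
  simp only [PySem.Int.toChars, if_neg this, Nat.toDigits] at hc
  rcases pvMemToDigitsCore _ _ _ _ hc with h' | ⟨m, hm, rfl⟩
  · cases h'
  · exact lt_of_le_of_lt (pvCharInt_digitChar_le m hm) (by norm_num)

theorem pvNodupOfLen : ∀ (xs : List Int),
    (PySem.Set.ofList xs).length = xs.length → xs.Nodup := by
  intro xs
  induction xs with
  | nil => intro _; exact List.nodup_nil
  | cons x xs ih =>
    intro hlen
    rw [PySem.Set.ofList_cons] at hlen
    by_cases hx : x ∈ xs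
    · exfalso
      have hxs : x ∈ PySem.Set.ofList xs := (PySem.Set.mem_ofList xs x).mpr hx
      have h1 : ((PySem.Set.ofList xs).discard x).length < (PySem.Set.ofList xs).length := by
        simp only [PySem.Set.discard]
        exact List.length_filter_lt_length_iff_exists.mpr ⟨x, hxs, by simp⟩
      have h2 := PySem.Set.length_ofList_le xs
      simp only [List.length_cons] at hlen
      omega
    · have hdisc : (PySem.Set.ofList xs).discard x = PySem.Set.ofList xs := by
        simp only [PySem.Set.discard]
        apply List.filter_eq_self.mpr
        intro a ha
        have hmem : a ∈ xs := (PySem.Set.mem_ofList xs a).mp ha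
        simp only [Bool.not_eq_eq_eq_not, Bool.not_true, beq_eq_false_iff_ne, ne_eq]
        intro heq; exact hx (heq ▸ hmem)
      rw [hdisc] at hlen
      simp only [List.length_cons, Nat.add_left_inj] at hlen
      exact List.nodup_cons.mpr ⟨hx, ih hlen⟩

-- B's two checks together say exactly "strictly decreasing"
theorem pvAltIff (ds : List Int) :
    (ds = PySem.List.sorted ds (fun x => x) true ∧ (PySem.Set.ofList ds).length = ds.length)
      ↔ List.Pairwise (fun a b => b < a) ds := by
  constructor
  · rintro ⟨hsort, hlen⟩
    have hle : List.Pairwise (fun a b : Int => b ≤ a) ds := by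
      rw [hsort]; exact PySem.List.sorted_pairwise_rev ds (fun x => x)
    have hnd : ds.Nodup := pvNodupOfLen ds hlen
    exact (hle.and hnd).imp (fun h => lt_of_le_of_ne h.1 (Ne.symm h.2))
  · intro h
    refine ⟨(PySem.List.sorted_rev_eq_of_perm_of_pairwise_gt ds ds (fun x => x) (List.Perm.refl ds) h).symm, ?_⟩
    have hnd : ds.Nodup := h.imp (fun hlt => (ne_of_lt hlt).symm)
    rw [PySem.Set.ofList_eq_self_of_nodup ds hnd]

-- ===== VERDICT (by name: the statement is the Claim_ definition above) =====
theorem is_strictly_decreasing_spec : Claim_equal_is_strictly_decreasing := by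
  intro num _ hpre
  unfold Spec_is_strictly_decreasing is_strictly_decreasing is_strictly_decreasing_alt get_digits
  rw [pvFoldlAppend]
  simp only [List.nil_append]
  set ds := (PySem.Int.toChars num).map pvCharInt with hds
  rw [Bool.eq_iff_iff]
  rw [pvDecLoop_iff, List.pairwise_cons]
  simp only [Bool.and_eq_true, decide_eq_true_iff]
  rw [pvAltIff]
  constructor
  · rintro ⟨_, h⟩; exact h
  · intro h; exact ⟨fun d hd => pvDigits_lt num hpre d hd, h⟩
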